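-- pv_equiv track=rewrite | github.com/selleronom/AoC_2024 | runner/utils/helpers.py | remove_markdown
-- ===== SOURCE A (Python) =====
-- def remove_markdown(code: str) -> str:
--     """Remove markdown formatting from code."""
--     cleaned_code = []
--     lines = code.splitlines()
--     in_code_block = False
--
--     for line in lines:
--         line = line.strip()
--         if line.startswith("```"):
--             in_code_block = not in_code_block
--             continue
--         if in_code_block and not line.startswith("//"):
--             cleaned_code.append(line)
--
--     return "\n".join(cleaned_code)
-- ===== SOURCE B (Python) =====
-- def remove_markdown(code: str) -> str:
--     """Remove markdown formatting from code.
--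
--     Splits the stripped lines into segments at every ``` fence line; the
--     odd-indexed segments are exactly the code-block regions, from which
--     comment lines are dropped.
--     """
--     segments = []
--     current = []
--     for line in code.splitlines():
--         line = line.strip()
--         if line.startswith("```"):
--             segments.append(current)
--             current = []
--         else:
--             current.append(line)
--     segments.append(current)
--     kept = [ln for i, seg in enumerate(segments) if i % 2 == 1
--             for ln in seg if not ln.startswith("//")]
--     return "\n".join(kept)
-- ===== Notes on version B (the rewrite author's own statement) =====
-- stated objective: alternative
-- what changed: A's stateful toggle scan (an in_code_block flag flipped at each fence, collecting lines while inside) is replaced by partitioning the stripped lines into fence-delimited segments and then keeping the non-comment lines of the odd-indexed segments.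
import Mathlib
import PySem

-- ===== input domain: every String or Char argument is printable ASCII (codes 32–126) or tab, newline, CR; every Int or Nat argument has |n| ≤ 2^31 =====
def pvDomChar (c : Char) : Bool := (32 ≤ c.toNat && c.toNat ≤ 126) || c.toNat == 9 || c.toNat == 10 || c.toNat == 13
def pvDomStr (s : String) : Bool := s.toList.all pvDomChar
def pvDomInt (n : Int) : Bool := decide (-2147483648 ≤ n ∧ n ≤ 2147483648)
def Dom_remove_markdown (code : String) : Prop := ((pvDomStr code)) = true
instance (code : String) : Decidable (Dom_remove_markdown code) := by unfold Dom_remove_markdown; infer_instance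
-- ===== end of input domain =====

-- B replaces A's in_code_block toggle scan by a partition into fence-delimited
-- segments followed by selection of the odd-indexed ones (objective: alternative).

-- ===== PORT A =====
-- A's loop body: toggle the flag at a fence line, else collect non-comment lines while inside
def pvStepA (st : List String × Bool) (line0 : String) : List String × Bool :=
  let line := PySem.Str.strip line0
  if PySem.Str.startswith line "```" then (st.1, !st.2)
  else if st.2 && !(PySem.Str.startswith line "//") then (st.1 ++ [line], st.2)
  else st

-- literal port of A: single pass with an in_code_block flag toggled at every fence line
def remove_markdown (code : String) : String :=
  let st := (PySem.Str.splitlines code).foldl pvStepA ([], false)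
  PySem.Str.join "\n" st.1

-- ===== PORT B =====
-- B's loop body: close the current segment at a fence line, else extend it
def pvStepB (st : List (List String) × List String) (line0 : String) : List (List String) × List String :=
  let line := PySem.Str.strip line0
  if PySem.Str.startswith line "```" then (st.1 ++ [st.2], [])
  else (st.1, st.2 ++ [line])

-- kept lines of the segments enumerated from index s: the odd-indexed segments, comment lines dropped
def pvKept (s : Int) (segs : List (List String)) : List String :=
  (PySem.List.enumerate segs s).flatMap
    (fun p => if p.1 % 2 == 1 then p.2.filter (fun ln => !(PySem.Str.startswith ln "//")) else [])

-- literal port of B: split stripped lines into segments at fence lines, then keep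
-- non-comment lines of the odd-indexed segments
def remove_markdown_alt (code : String) : String :=
  let st := (PySem.Str.splitlines code).foldl pvStepB ([], [])
  let segments := st.1 ++ [st.2]
  PySem.Str.join "\n" (pvKept 0 segments)

-- ===== PRECONDITION & SPEC =====
def Spec_remove_markdown (code : String) (out : String) : Prop := out = remove_markdown_alt code
instance (code : String) (out : String) : Decidable (Spec_remove_markdown code out) := by unfold Spec_remove_markdown; infer_instance

-- ===== CLAIM (what is proved, stated in full; the proofs are below) =====
def Claim_equal_remove_markdown : Prop := ∀ (code : String), Dom_remove_markdown code → Spec_remove_markdown code (remove_markdown code)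

-- ===== LEMMAS AND PROOFS =====

theorem pvKept_append (s : Int) (xs ys : List (List String)) :
    pvKept s (xs ++ ys) = pvKept s xs ++ pvKept (s + xs.length) ys := by
  simp [pvKept, PySem.List.enumerate_append]

theorem pvKept_singleton (s : Int) (seg : List String) :
    pvKept s [seg] = if s % 2 == 1 then seg.filter (fun ln => !(PySem.Str.startswith ln "//")) else [] := by
  simp [pvKept, PySem.List.enumerate]

-- invariant: A's flag is the parity of the number of completed segments, and A's
-- accumulator equals the kept lines of B's completed segments plus the current one
theorem pv_loop (lines : List String) :
    ∀ (done : List (List String)) (cur acc : List String),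
      acc = pvKept 0 (done ++ [cur]) →
      (let stB := lines.foldl pvStepB (done, cur)
       let stA := lines.foldl pvStepA (acc, decide (done.length % 2 = 1))
       stA.1 = pvKept 0 (stB.1 ++ [stB.2]) ∧ stA.2 = decide (stB.1.length % 2 = 1)) := by
  induction lines with
  | nil =>
    intro done cur acc h
    simp only [List.foldl_nil]
    exact ⟨h, rfl⟩
  | cons l ls ih =>
    intro done cur acc h
    simp only [List.foldl_cons]
    by_cases hf : PySem.Str.startswith (PySem.Str.strip l) "```" = true
    · have hB : pvStepB (done, cur) l = (done ++ [cur], []) := by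
        simp only [pvStepB, hf, if_pos]
      have hflag : (!decide (done.length % 2 = 1)) = decide ((done ++ [cur]).length % 2 = 1) := by
        simp only [List.length_append, List.length_cons, List.length_nil]
        rcases Nat.even_or_odd done.length with he | ho
        · have := Nat.even_iff.mp he
          simp [Nat.add_mod, this]
        · have := Nat.odd_iff.mp ho
          simp [Nat.add_mod, this]
      have hA : pvStepA (acc, decide (done.length % 2 = 1)) l
          = (acc, decide ((done ++ [cur]).length % 2 = 1)) := by
        simp only [pvStepA, hf, if_pos]
        rw [hflag]
      have hacc : acc = pvKept 0 ((done ++ [cur]) ++ [[]]) := by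
        rw [pvKept_append, pvKept_singleton]
        simpa using h
      simp only [hB, hA]
      exact ih (done ++ [cur]) [] acc hacc
    · have hfn : PySem.Chars.startswith (PySem.Chars.strip l.toList) ['`', '`', '`'] = false := by
        simpa using Bool.eq_false_iff.mpr hf
      have hB : pvStepB (done, cur) l = (done, cur ++ [PySem.Str.strip l]) := by
        simp [pvStepB, hfn]
      by_cases hp : done.length % 2 = 1
      · have hpi : ((done.length : Int) % 2 = 1) := by omega
        by_cases hc : PySem.Str.startswith (PySem.Str.strip l) "//" = true
        · -- comment line inside a block: A skips it, B stores it and filters it out later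
          have hc' : PySem.Chars.startswith (PySem.Chars.strip l.toList) ['/', '/'] = true := by
            simpa using hc
          have hA : pvStepA (acc, decide (done.length % 2 = 1)) l
              = (acc, decide (done.length % 2 = 1)) := by
            simp [pvStepA, hfn, hc']
          have hacc : acc = pvKept 0 (done ++ [cur ++ [PySem.Str.strip l]]) := by
            rw [pvKept_append, pvKept_singleton, h, pvKept_append, pvKept_singleton]
            simp [hpi, List.filter_append, hc']
          simp only [hB, hA]
          exact ih done (cur ++ [PySem.Str.strip l]) acc hacc
        · have hc' : PySem.Chars.startswith (PySem.Chars.strip l.toList) ['/', '/'] = false := by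
            simpa using Bool.eq_false_iff.mpr hc
          have hA : pvStepA (acc, decide (done.length % 2 = 1)) l
              = (acc ++ [PySem.Str.strip l], decide (done.length % 2 = 1)) := by
            simp [pvStepA, hfn, hp, hc']
          have hacc : acc ++ [PySem.Str.strip l]
              = pvKept 0 (done ++ [cur ++ [PySem.Str.strip l]]) := by
            rw [pvKept_append, pvKept_singleton, h, pvKept_append, pvKept_singleton]
            simp [hpi, List.filter_append, hc']
          simp only [hB, hA]
          exact ih done (cur ++ [PySem.Str.strip l]) _ hacc
      · have hpi : ¬ ((done.length : Int) % 2 = 1) := by omega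
        have hA : pvStepA (acc, decide (done.length % 2 = 1)) l
            = (acc, decide (done.length % 2 = 1)) := by
          simp [pvStepA, hfn, hp]
        have hacc : acc = pvKept 0 (done ++ [cur ++ [PySem.Str.strip l]]) := by
          rw [pvKept_append, pvKept_singleton, h, pvKept_append, pvKept_singleton]
          simp [hpi]
        simp only [hB, hA]
        exact ih done (cur ++ [PySem.Str.strip l]) acc hacc

-- ===== VERDICT (by name: the statement is the Claim_ definition above) =====
theorem remove_markdown_spec : Claim_equal_remove_markdown := by
  intro code _
  unfold Spec_remove_markdown remove_markdown remove_markdown_alt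
  have h := pv_loop (PySem.Str.splitlines code) [] [] []
    (by rw [List.nil_append, pvKept_singleton]; simp)
  exact congrArg (PySem.Str.join "\n") h.1
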